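-- pv_equiv track=rewrite | github.com/Wx-Alliance-Alliance-Meteo/WxFactory | scripts/eigenvalue.py | permutations_3d
-- ===== SOURCE A (Python) =====
-- def permutations_3d(num_tiles: int, num_elem_h: int, num_elem_v: int, order: int, num_vars: int):
--     p = []
--     for t in range(num_tiles):  # |
--         for e1 in range(num_elem_h):  # |
--             for e2 in range(num_elem_h):  # |
--                 for e3 in range(num_elem_v):  # |   <- The order we want
--                     for o1 in range(order):  # |
--                         for o2 in range(order):  # |
--                             for o3 in range(order):  # |
--                                 for v in range(num_vars):  # |
--                                     p.append(
--                                         num_vars * num_elem_v * order * num_elem_h * order * num_elem_h * order * t  # |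
--                                         + num_elem_v * order * num_elem_h * order * num_elem_h * order * v  # |
--                                         + order * num_elem_h * order * num_elem_h * order * e3  # |
--                                         + num_elem_h * order * num_elem_h * order * o3  # | <- The order we have
--                                         + order * num_elem_h * order * e1  # |
--                                         + num_elem_h * order * o1  # |
--                                         + order * e2  # |
--                                         + o2
--                                     )  # |
--     return p
-- ===== SOURCE B (Python) =====
-- def permutations_3d(num_tiles: int, num_elem_h: int, num_elem_v: int, order: int, num_vars: int):
--     # Mixed-radix re-encoding: one flat loop decodes each want-order rank j
--     # into its digits and re-encodes them with the have-order strides.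
--     s_o2 = 1
--     s_e2 = order
--     s_o1 = num_elem_h * order
--     s_e1 = order * s_o1
--     s_o3 = num_elem_h * s_e1
--     s_e3 = order * s_o3
--     s_v = num_elem_v * s_e3
--     s_t = num_vars * s_v
--     axes = [(num_tiles, s_t), (num_elem_h, s_e1), (num_elem_h, s_e2),
--             (num_elem_v, s_e3), (order, s_o1), (order, s_o2),
--             (order, s_o3), (num_vars, s_v)]
--     if any(r <= 0 for r, _ in axes):
--         return []
--     total = 1
--     for r, _ in axes:
--         total *= r
--     out = []
--     for j in range(total):
--         k = j
--         val = 0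
--         for r, s in reversed(axes):
--             k, d = divmod(k, r)
--             val += d * s
--         out.append(val)
--     return out
-- ===== Notes on version B (the rewrite author's own statement) =====
-- stated objective: alternative
-- what changed: Replaces the eight nested loops and per-element stride multiplication by a single flat loop that mixed-radix-decodes each want-order rank and re-encodes the digits with precomputed have-order strides.
import Mathlib
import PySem

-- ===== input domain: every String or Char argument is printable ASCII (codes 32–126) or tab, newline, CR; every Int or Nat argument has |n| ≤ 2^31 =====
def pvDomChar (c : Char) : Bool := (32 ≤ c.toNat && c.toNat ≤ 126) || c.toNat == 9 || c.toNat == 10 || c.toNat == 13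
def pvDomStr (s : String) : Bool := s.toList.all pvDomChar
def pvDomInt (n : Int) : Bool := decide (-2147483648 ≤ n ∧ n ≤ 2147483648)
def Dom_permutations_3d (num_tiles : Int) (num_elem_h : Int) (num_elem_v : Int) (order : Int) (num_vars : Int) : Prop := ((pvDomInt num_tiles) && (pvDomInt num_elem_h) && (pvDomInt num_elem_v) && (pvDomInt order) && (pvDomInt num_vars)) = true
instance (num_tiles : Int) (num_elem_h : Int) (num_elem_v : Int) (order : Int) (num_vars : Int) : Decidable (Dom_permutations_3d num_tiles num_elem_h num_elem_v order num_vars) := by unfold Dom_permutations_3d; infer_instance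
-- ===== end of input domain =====

-- B replaces the eight nested loops by one flat loop that mixed-radix-decodes each
-- want-order rank and re-encodes it with precomputed have-order strides (alternative, same cost).

-- ===== PORT A =====
def permutations_3d (num_tiles : Int) (num_elem_h : Int) (num_elem_v : Int) (order : Int) (num_vars : Int) : List Int :=
  (PySem.List.pyRange 0 num_tiles 1).foldl (fun p t =>
    (PySem.List.pyRange 0 num_elem_h 1).foldl (fun p e1 =>
      (PySem.List.pyRange 0 num_elem_h 1).foldl (fun p e2 =>
        (PySem.List.pyRange 0 num_elem_v 1).foldl (fun p e3 =>
          (PySem.List.pyRange 0 order 1).foldl (fun p o1 =>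
            (PySem.List.pyRange 0 order 1).foldl (fun p o2 =>
              (PySem.List.pyRange 0 order 1).foldl (fun p o3 =>
                (PySem.List.pyRange 0 num_vars 1).foldl (fun p v =>
                  p ++ [num_vars * num_elem_v * order * num_elem_h * order * num_elem_h * order * t
                        + num_elem_v * order * num_elem_h * order * num_elem_h * order * v
                        + order * num_elem_h * order * num_elem_h * order * e3
                        + num_elem_h * order * num_elem_h * order * o3
                        + order * num_elem_h * order * e1
                        + num_elem_h * order * o1
                        + order * e2
                        + o2]) p) p) p) p) p) p) p) []

-- ===== PORT B =====
def permutations_3d_alt (num_tiles : Int) (num_elem_h : Int) (num_elem_v : Int) (order : Int) (num_vars : Int) : List Int :=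
  let s_o2 : Int := 1
  let s_e2 := order
  let s_o1 := num_elem_h * order
  let s_e1 := order * s_o1
  let s_o3 := num_elem_h * s_e1
  let s_e3 := order * s_o3
  let s_v := num_elem_v * s_e3
  let s_t := num_vars * s_v
  let axes : List (Int × Int) :=
    [(num_tiles, s_t), (num_elem_h, s_e1), (num_elem_h, s_e2),
     (num_elem_v, s_e3), (order, s_o1), (order, s_o2),
     (order, s_o3), (num_vars, s_v)]
  if axes.any (fun p => p.1 ≤ 0) then []
  else
    let total := axes.foldl (fun acc p => acc * p.1) 1
    (PySem.List.pyRange 0 total 1).foldl (fun out j =>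
      let st := axes.reverse.foldl
        (fun (st : Int × Int) p =>
          (PySem.Int.floordiv st.1 p.1, st.2 + PySem.Int.mod st.1 p.1 * p.2))
        (j, 0)
      out ++ [st.2]) []

-- ===== PRECONDITION & SPEC =====
def Spec_permutations_3d (num_tiles : Int) (num_elem_h : Int) (num_elem_v : Int) (order : Int) (num_vars : Int) (out : List Int) : Prop := out = permutations_3d_alt num_tiles num_elem_h num_elem_v order num_vars
instance (num_tiles : Int) (num_elem_h : Int) (num_elem_v : Int) (order : Int) (num_vars : Int) (out : List Int) : Decidable (Spec_permutations_3d num_tiles num_elem_h num_elem_v order num_vars out) := by unfold Spec_permutations_3d; infer_instance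

-- ===== CLAIM (what is proved, stated in full; the proofs are below) =====
def Claim_equal_permutations_3d : Prop := ∀ (num_tiles : Int) (num_elem_h : Int) (num_elem_v : Int) (order : Int) (num_vars : Int), Dom_permutations_3d num_tiles num_elem_h num_elem_v order num_vars → Spec_permutations_3d num_tiles num_elem_h num_elem_v order num_vars (permutations_3d num_tiles num_elem_h num_elem_v order num_vars)

-- ===== LEMMAS AND PROOFS =====

-- lexicographic nested enumeration over (radix, stride) axes, accumulating base + digit*stride
def nestedEnum : List (Int × Int) → Int → List Int
  | [], base => [base]
  | (r, s) :: rest, base =>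
      (PySem.List.pyRange 0 r 1).flatMap (fun d => nestedEnum rest (base + d * s))

-- mixed-radix decode-and-reencode, radices listed least-significant first
def decodeVal : List (Int × Int) → Int → Int
  | [], _ => 0
  | (r, s) :: rest, k => PySem.Int.mod k r * s + decodeVal rest (PySem.Int.floordiv k r)

lemma nestedEnum_append (xs ys : List (Int × Int)) (base : Int) :
    nestedEnum (xs ++ ys) base = (nestedEnum xs base).flatMap (fun b => nestedEnum ys b) := by
  induction xs generalizing base with
  | nil => simp [nestedEnum]
  | cons p rest ih =>
      obtain ⟨r, s⟩ := p
      simp [nestedEnum, ih, List.flatMap_assoc]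

lemma nestedEnum_nonpos (axes : List (Int × Int)) (h : ∃ p ∈ axes, p.1 ≤ 0) (base : Int) :
    nestedEnum axes base = [] := by
  induction axes generalizing base with
  | nil => simp at h
  | cons p rest ih =>
      obtain ⟨r, s⟩ := p
      rcases h with ⟨q, hq, hle⟩
      rcases List.mem_cons.1 hq with rfl | hmem
      · simp [nestedEnum, PySem.List.pyRange_one_eq_nil (show r ≤ 0 by simpa using hle)]
      · simp [nestedEnum, ih ⟨q, hmem, hle⟩]

lemma range_shift (c r : Int) :
    PySem.List.pyRange c (c + r) 1 = (PySem.List.pyRange 0 r 1).map (fun d => c + d) := by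
  simp [PySem.List.pyRange_one, List.map_map, Function.comp_def]

lemma range_split (r : Int) (hr : 0 < r) :
    ∀ P : Int, 0 ≤ P →
      PySem.List.pyRange 0 (P * r) 1 =
        (PySem.List.pyRange 0 P 1).flatMap
          (fun q => (PySem.List.pyRange 0 r 1).map (fun d => q * r + d)) := by
  intro P hP
  induction P, hP using Int.le_induction with
  | base => simp [PySem.List.pyRange_one_eq_nil]
  | succ P hP0 ih =>
      have h1 : (P + 1) * r = P * r + r := by ring
      have h2 : (0:Int) ≤ P * r := mul_nonneg hP0 (le_of_lt hr)
      rw [h1, PySem.List.pyRange_one_append 0 (P * r) (P * r + r) h2 (by omega),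
          PySem.List.pyRange_one_succ_right hP0, ih, range_shift]
      simp

lemma prod_pos (axes : List (Int × Int)) (h : ∀ p ∈ axes, 0 < p.1) :
    0 < (axes.map Prod.fst).prod := by
  induction axes with
  | nil => simp
  | cons p rest ih =>
      simp only [List.map_cons, List.prod_cons]
      exact mul_pos (h p (by simp)) (ih fun q hq => h q (by simp [hq]))

lemma nestedEnum_eq_decode (axes : List (Int × Int)) (h : ∀ p ∈ axes, 0 < p.1) (base : Int) :
    nestedEnum axes base =
      (PySem.List.pyRange 0 ((axes.map Prod.fst).prod) 1).map
        (fun j => base + decodeVal axes.reverse j) := by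
  induction axes using List.reverseRecOn generalizing base with
  | nil =>
      simp [nestedEnum, decodeVal, PySem.List.pyRange_one_cons (by norm_num : (0:Int) < 1),
            PySem.List.pyRange_one_eq_nil (by norm_num : (1:Int) ≤ 1)]
  | append_singleton init p ih =>
      obtain ⟨r, s⟩ := p
      have hr : 0 < r := h (r, s) (by simp)
      have hinit : ∀ q ∈ init, 0 < q.1 := fun q hq => h q (by simp [hq])
      have hP : 0 ≤ (init.map Prod.fst).prod := le_of_lt (prod_pos init hinit)
      rw [nestedEnum_append, ih hinit]
      simp only [List.flatMap_map, List.map_append, List.map_cons, List.prod_append,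
        List.prod_cons, List.map_nil, List.prod_nil, mul_one, List.reverse_append,
        List.reverse_cons, List.reverse_nil, List.nil_append, List.cons_append]
      rw [range_split r hr _ hP, List.map_flatMap]
      apply List.flatMap_congr
      intro q hq
      simp only [nestedEnum, ← List.map_eq_flatMap, List.map_map]
      apply List.map_congr_left
      intro d hd
      have hd' := (PySem.List.mem_pyRange_one).1 hd
      have hmod : PySem.Int.mod (q * r + d) r = d := by
        rw [PySem.Int.mod_eq_emod_of_pos hr]
        have hqrd : q * r + d = d + r * q := by ring
        rw [hqrd, Int.add_mul_emod_self_left, Int.emod_eq_of_lt hd'.1 hd'.2]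
      have hdiv : PySem.Int.floordiv (q * r + d) r = q := by
        rw [PySem.Int.floordiv_eq_ediv_of_pos hr]
        have hqrd : q * r + d = d + r * q := by ring
        rw [hqrd, Int.add_mul_ediv_left _ _ (by omega), Int.ediv_eq_zero_of_lt hd'.1 hd'.2]
        ring
      simp only [Function.comp_def, decodeVal, hmod, hdiv]
      ring

-- B's inner state fold computes decodeVal
lemma foldl_decode (L : List (Int × Int)) :
    ∀ k v : Int,
      (L.foldl (fun (st : Int × Int) p =>
          (PySem.Int.floordiv st.1 p.1, st.2 + PySem.Int.mod st.1 p.1 * p.2)) (k, v)).2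
        = v + decodeVal L k := by
  induction L with
  | nil => intro k v; simp [decodeVal]
  | cons p rest ih =>
      intro k v
      obtain ⟨r, s⟩ := p
      simp only [List.foldl_cons, decodeVal, ih]
      ring

-- A's nested loops are nestedEnum on the concrete axis list
lemma permA_eq_nestedEnum (nt h v o nv : Int) :
    permutations_3d nt h v o nv =
      nestedEnum [(nt, nv * (v * (o * (h * (o * (h * o)))))),
                  (h, o * (h * o)), (h, o),
                  (v, o * (h * (o * (h * o)))),
                  (o, h * o), (o, 1),
                  (o, h * (o * (h * o))),
                  (nv, v * (o * (h * (o * (h * o)))))] 0 := by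
  unfold permutations_3d
  simp only [PySem.List.foldl_append_singleton_eq_map, PySem.List.foldl_append_eq_flatMap,
    nestedEnum, List.nil_append]
  apply List.flatMap_congr; intro t _
  apply List.flatMap_congr; intro e1 _
  apply List.flatMap_congr; intro e2 _
  apply List.flatMap_congr; intro e3 _
  apply List.flatMap_congr; intro o1 _
  apply List.flatMap_congr; intro o2 _
  apply List.flatMap_congr; intro o3 _
  rw [← List.map_eq_flatMap]
  apply List.map_congr_left; intro vv _
  ring

-- B's body (zeta-reduced) equals nestedEnum on the same axis list
lemma alt_body_eq_nestedEnum (axes : List (Int × Int)) :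
    (if axes.any (fun p => p.1 ≤ 0) then ([] : List Int)
     else
       (PySem.List.pyRange 0 (axes.foldl (fun acc p => acc * p.1) 1) 1).foldl
         (fun out j =>
           out ++ [(axes.reverse.foldl
             (fun (st : Int × Int) p =>
               (PySem.Int.floordiv st.1 p.1, st.2 + PySem.Int.mod st.1 p.1 * p.2))
             (j, 0)).2]) [])
      = nestedEnum axes 0 := by
  by_cases hc : ∃ p ∈ axes, p.1 ≤ 0
  · rw [nestedEnum_nonpos axes hc, if_pos]
    simpa [List.any_eq_true] using hc
  · have hpos : ∀ p ∈ axes, 0 < p.1 := fun p hp =>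
      lt_of_not_ge fun hle => hc ⟨p, hp, hle⟩
    rw [if_neg (by simpa [List.any_eq_true, not_exists] using fun p hp => not_le_of_gt (hpos p hp)),
        nestedEnum_eq_decode axes hpos 0]
    have htot : axes.foldl (fun acc p => acc * p.1) 1 = (axes.map Prod.fst).prod := by
      rw [List.prod_eq_foldl, List.foldl_map]
    rw [htot, PySem.List.foldl_append_singleton_eq_map, List.nil_append]
    apply List.map_congr_left
    intro j _
    rw [foldl_decode]

-- ===== VERDICT (by name: the statement is the Claim_ definition above) =====
theorem permutations_3d_spec : Claim_equal_permutations_3d := by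
  intro nt h v o nv _
  unfold Spec_permutations_3d
  rw [permA_eq_nestedEnum]
  exact (alt_body_eq_nestedEnum _).symm
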